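-- pv_equiv track=rewrite | github.com/hungaborhorvath/advent_of_code | 2015/03/aoc_1503.py | visited_houses
-- ===== SOURCE A (Python) =====
-- def move(location:tuple[int, int], s:str) -> tuple[int, int]:
--     new_location = list(location)
--     if s == '^':
--         new_location[1] += 1
--     elif s == 'v':
--         new_location[1] -= 1
--     elif s == '>':
--         new_location[0] += 1
--     elif s == '<':
--         new_location[0] -= 1
--     return new_location[0], new_location[1]
--
-- def visited_houses(line:str,
--                    start:tuple[int, int] =(0, 0),
--                    step=1) -> list[tuple[int, int]]:
--     visited = [start]
--     for i, s in enumerate(line):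
--         if not i % step:
--             visited.append(move(visited[-1], s))
--     return visited
-- ===== SOURCE B (Python) =====
-- def visited_houses(line, start=(0, 0), step=1):
--     kept = [s for i, s in enumerate(line) if i % step == 0]
--     return _walk(start, kept)
--
-- def _walk(pos, chars):
--     if not chars:
--         return [pos]
--     c = chars[0]
--     nxt = (pos[0] + (c == '>') - (c == '<'),
--            pos[1] + (c == '^') - (c == 'v'))
--     return [pos] + _walk(nxt, chars[1:])
-- ===== Notes on version B (the rewrite author's own statement) =====
-- stated objective: alternative
-- what changed: Replaces the iterative append-to-a-growing-list loop keyed on visited[-1] by a filter pass plus a recursive walk that builds the path front-to-back by consing, computing each delta with boolean arithmetic instead of the if/elif branch chain.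
import Mathlib
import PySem

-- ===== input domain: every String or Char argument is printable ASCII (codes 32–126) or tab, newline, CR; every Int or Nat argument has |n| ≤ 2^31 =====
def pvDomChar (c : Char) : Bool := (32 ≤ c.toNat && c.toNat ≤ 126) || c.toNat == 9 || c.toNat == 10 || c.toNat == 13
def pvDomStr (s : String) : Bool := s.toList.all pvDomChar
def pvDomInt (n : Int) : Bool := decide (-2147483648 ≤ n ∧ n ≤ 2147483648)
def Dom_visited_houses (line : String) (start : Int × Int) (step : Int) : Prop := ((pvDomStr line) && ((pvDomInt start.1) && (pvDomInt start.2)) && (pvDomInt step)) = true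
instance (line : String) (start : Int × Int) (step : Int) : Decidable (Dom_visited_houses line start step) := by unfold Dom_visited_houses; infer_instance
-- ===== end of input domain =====

-- B replaces the iterative append loop keyed on visited[-1] by a filter pass plus a
-- recursive walk consing positions front-to-back, deltas via boolean arithmetic (alternative decomposition, same cost).


-- ===== PORT A =====
def pvMove (location : Int × Int) (s : Char) : Int × Int :=
  if s == '^' then (location.1, location.2 + 1)
  else if s == 'v' then (location.1, location.2 - 1)
  else if s == '>' then (location.1 + 1, location.2)
  else if s == '<' then (location.1 - 1, location.2)
  else (location.1, location.2)

-- visited[-1]: the list always carries start, so the .getD default is never taken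
def visited_houses (line : String) (start : Int × Int) (step : Int) : List (Int × Int) :=
  (PySem.List.enumerate line.toList).foldl
    (fun visited p =>
      if PySem.Int.mod p.1 step == 0 then
        visited ++ [pvMove ((PySem.List.pyGet? visited (-1)).getD (0, 0)) p.2]
      else visited)
    [start]

-- ===== PORT B =====
def pvWalk (pos : Int × Int) (chars : List Char) : List (Int × Int) :=
  match chars with
  | [] => [pos]
  | c :: rest =>
    let nxt : Int × Int :=
      (pos.1 + (if c == '>' then 1 else 0) - (if c == '<' then 1 else 0),
       pos.2 + (if c == '^' then 1 else 0) - (if c == 'v' then 1 else 0))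
    pos :: pvWalk nxt rest

def visited_houses_alt (line : String) (start : Int × Int) (step : Int) : List (Int × Int) :=
  let kept := ((PySem.List.enumerate line.toList).filter
      (fun p => PySem.Int.mod p.1 step == 0)).map Prod.snd
  pvWalk start kept

-- ===== PRECONDITION & SPEC =====
-- Python raises ZeroDivisionError on the index-modulo when step = 0 and the line is nonempty; excluded.
def Pre_visited_houses (line : String) (start : Int × Int) (step : Int) : Prop :=
  line.toList = [] ∨ step ≠ 0
instance (line : String) (start : Int × Int) (step : Int) : Decidable (Pre_visited_houses line start step) := by
  unfold Pre_visited_houses; infer_instance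

def pvWitness_visited_houses : String × (Int × Int) × Int := ("^>v<x", (0, 0), 2)

def Spec_visited_houses (line : String) (start : Int × Int) (step : Int) (out : List (Int × Int)) : Prop := out = visited_houses_alt line start step
instance (line : String) (start : Int × Int) (step : Int) (out : List (Int × Int)) : Decidable (Spec_visited_houses line start step out) := by unfold Spec_visited_houses; infer_instance

-- ===== CLAIM (what is proved, stated in full; the proofs are below) =====
def Claim_equal_visited_houses : Prop := ∀ (line : String) (start : Int × Int) (step : Int), Dom_visited_houses line start step → Pre_visited_houses line start step → Spec_visited_houses line start step (visited_houses line start step)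

-- ===== LEMMAS AND PROOFS =====

-- the branch chain of move() computes exactly the boolean-arithmetic step of pvWalk
theorem pvMove_eq_step (p : Int × Int) (c : Char) :
    pvMove p c =
      (p.1 + (if c == '>' then 1 else 0) - (if c == '<' then 1 else 0),
       p.2 + (if c == '^' then 1 else 0) - (if c == 'v' then 1 else 0)) := by
  unfold pvMove
  split_ifs with h1 h2 h3 h4 <;> simp_all

-- loop invariant: A's fold over a tail, started from any nonempty visited list whose last
-- element is p, equals that list minus its last element followed by B's recursive walk
-- from p over the kept characters of the tail
theorem pv_key (step : Int) (L : List (Int × Char)) :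
    ∀ (acc : List (Int × Int)) (p : Int × Int), acc.getLast? = some p →
    L.foldl
      (fun visited q =>
        if PySem.Int.mod q.1 step == 0 then
          visited ++ [pvMove ((PySem.List.pyGet? visited (-1)).getD (0, 0)) q.2]
        else visited) acc
    =
    acc.dropLast ++ pvWalk p ((L.filter (fun q => PySem.Int.mod q.1 step == 0)).map Prod.snd) := by
  induction L with
  | nil =>
    intro acc p h
    have hne : acc ≠ [] := by intro he; simp [he] at h
    simp [pvWalk]
    rw [show p = acc.getLast hne from by
      have := List.getLast?_eq_some_getLast (l := acc) (h := hne); rw [this] at h; exact (Option.some.inj h).symm]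
    exact (List.dropLast_append_getLast hne).symm
  | cons q L ih =>
    intro acc p h
    cases hc : (PySem.Int.mod q.1 step == 0) with
    | true =>
      have hlast : PySem.List.pyGet? acc (-1) = some p := by
        rw [PySem.List.pyGet?_neg_one, h]
      have hne : acc ≠ [] := by intro he; simp [he] at h
      have hacc : acc.dropLast ++ [p] = acc := by
        rw [show p = acc.getLast hne from by
          have := List.getLast?_eq_some_getLast (l := acc) (h := hne)
          rw [this] at h; exact (Option.some.inj h).symm]
        exact List.dropLast_append_getLast hne
      simp only [List.foldl_cons, List.filter_cons, hc, if_true, List.map_cons]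
      rw [hlast, Option.getD_some,
        ih (acc ++ [pvMove p q.2]) (pvMove p q.2) List.getLast?_concat]
      simp only [pvWalk, List.dropLast_concat]
      rw [← pvMove_eq_step]
      conv_lhs => rw [← hacc]
      simp
    | false =>
      simp only [List.foldl_cons, List.filter_cons, hc, Bool.false_eq_true, if_false]
      exact ih acc p h

-- ===== VERDICT (by name: the statement is the Claim_ definition above) =====
theorem visited_houses_spec : Claim_equal_visited_houses := by
  intro line start step _ _
  unfold Spec_visited_houses visited_houses visited_houses_alt
  simpa using pv_key step (PySem.List.enumerate line.toList) [start] start (by simp)
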